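-- pv_equiv track=rewrite | github.com/Chevis-hah/Trader | validation/cpcv.py | _compute_group_bounds
-- ===== SOURCE A (Python) =====
-- from typing import Callable, Iterator, List, Optional, Tuple
--
-- def _compute_group_bounds(n: int, n_groups: int) -> List[Tuple[int, int]]:
--     """把 [0, n) 切成 n_groups 个连续块 (余数分给前若干块)。"""
--     if n < n_groups:
--         raise ValueError(f"样本数 {n} 少于 n_groups {n_groups}")
--     base = n // n_groups
--     rem = n - base * n_groups
--     bounds = []
--     start = 0
--     for i in range(n_groups):
--         sz = base + (1 if i < rem else 0)
--         bounds.append((start, start + sz))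
--         start += sz
--     return bounds
-- ===== SOURCE B (Python) =====
-- def _compute_group_bounds(n: int, n_groups: int):
--     """Closed-form group bounds: no running accumulator."""
--     if n < n_groups:
--         raise ValueError(f"样本数 {n} 少于 n_groups {n_groups}")
--     base = n // n_groups
--     rem = n % n_groups
--     return [(i * base + min(i, rem), (i + 1) * base + min(i + 1, rem))
--             for i in range(n_groups)]
-- ===== Notes on version B (the rewrite author's own statement) =====
-- stated objective: alternative
-- what changed: Replaces the running start-accumulator loop with a direct per-index closed form start_i = i*base + min(i, rem) computed in a comprehension.
import Mathlib
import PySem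

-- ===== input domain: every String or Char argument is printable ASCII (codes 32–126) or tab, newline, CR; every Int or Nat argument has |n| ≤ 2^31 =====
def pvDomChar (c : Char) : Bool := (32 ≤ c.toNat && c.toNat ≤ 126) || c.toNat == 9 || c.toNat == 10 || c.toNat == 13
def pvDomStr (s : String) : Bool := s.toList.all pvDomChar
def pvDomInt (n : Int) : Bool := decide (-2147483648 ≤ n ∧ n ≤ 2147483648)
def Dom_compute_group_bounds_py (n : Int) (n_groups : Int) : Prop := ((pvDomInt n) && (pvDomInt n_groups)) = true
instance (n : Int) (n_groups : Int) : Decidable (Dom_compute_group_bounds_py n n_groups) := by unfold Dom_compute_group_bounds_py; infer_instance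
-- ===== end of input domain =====

-- B replaces A's running start-accumulator with a closed-form per-index bound (alternative decomposition, same cost).


-- ===== PORT A =====
-- A: running-accumulator loop appending (start, start+sz) and advancing start.
def compute_group_bounds_py (n : Int) (n_groups : Int) : List (Int × Int) :=
  let base := PySem.Int.floordiv n n_groups
  let rem := n - base * n_groups
  ((PySem.List.pyRange 0 n_groups 1).foldl
    (fun (st : List (Int × Int) × Int) i =>
      let sz := base + (if i < rem then 1 else 0)
      (st.1 ++ [(st.2, st.2 + sz)], st.2 + sz))
    ([], 0)).1

-- ===== PORT B =====
-- B: closed-form bounds per index, no accumulator.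
def compute_group_bounds_py_alt (n : Int) (n_groups : Int) : List (Int × Int) :=
  let base := PySem.Int.floordiv n n_groups
  let rem := PySem.Int.mod n n_groups
  (PySem.List.pyRange 0 n_groups 1).map (fun i =>
    (i * base + min i rem, (i + 1) * base + min (i + 1) rem))

-- ===== PRECONDITION & SPEC =====
-- Pre_ excludes exactly where A raises: n < n_groups (ValueError) and n_groups = 0 (ZeroDivisionError).
def Pre_compute_group_bounds_py (n : Int) (n_groups : Int) : Prop :=
  n_groups ≠ 0 ∧ n_groups ≤ n
instance (n : Int) (n_groups : Int) : Decidable (Pre_compute_group_bounds_py n n_groups) := by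
  unfold Pre_compute_group_bounds_py; infer_instance
def pvWitness_compute_group_bounds_py : Int × Int := (7, 3)
def Spec_compute_group_bounds_py (n : Int) (n_groups : Int) (out : List (Int × Int)) : Prop := out = compute_group_bounds_py_alt n n_groups
instance (n : Int) (n_groups : Int) (out : List (Int × Int)) : Decidable (Spec_compute_group_bounds_py n n_groups out) := by unfold Spec_compute_group_bounds_py; infer_instance

-- ===== CLAIM (what is proved, stated in full; the proofs are below) =====
def Claim_equal_compute_group_bounds_py : Prop := ∀ (n : Int) (n_groups : Int), Dom_compute_group_bounds_py n n_groups → Pre_compute_group_bounds_py n n_groups → Spec_compute_group_bounds_py n n_groups (compute_group_bounds_py n n_groups)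

-- ===== LEMMAS AND PROOFS =====

-- Loop invariant: starting the fold at index a with start = a*base + min a rem
-- produces exactly the closed-form pairs for indices a..b-1, appended to acc.
lemma pv_loop_eq (base rem : Int) :
    ∀ (k : Nat) (a b : Int), (b - a).toNat = k → ∀ (acc : List (Int × Int)),
    ((PySem.List.pyRange a b 1).foldl
      (fun (st : List (Int × Int) × Int) i =>
        let sz := base + (if i < rem then 1 else 0)
        (st.1 ++ [(st.2, st.2 + sz)], st.2 + sz))
      (acc, a * base + min a rem)).1
      = acc ++ (PySem.List.pyRange a b 1).map (fun i =>
          (i * base + min i rem, (i + 1) * base + min (i + 1) rem)) := by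
  intro k
  induction k with
  | zero =>
      intro a b hk acc
      have hba : b ≤ a := by omega
      have : PySem.List.pyRange a b 1 = [] := by
        simp [PySem.List.pyRange_one, hk]
      simp [this]
  | succ k ih =>
      intro a b hk acc
      have hab : a < b := by omega
      rw [PySem.List.pyRange_one_cons hab]
      simp only [List.foldl_cons, List.map_cons]
      have hstep : a * base + min a rem + (base + (if a < rem then 1 else 0))
          = (a + 1) * base + min (a + 1) rem := by
        by_cases h : a < rem
        · simp [h, min_eq_left (by omega : a ≤ rem)]
          ring
        · simp [h, min_eq_right (by omega : rem ≤ a), min_eq_right (by omega : rem ≤ a + 1)]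
          ring
      have := ih (a + 1) b (by omega) (acc ++ [(a * base + min a rem, a * base + min a rem + (base + (if a < rem then 1 else 0)))])
      rw [hstep] at this
      simp only [this, hstep]
      simp

-- ===== VERDICT (by name: the statement is the Claim_ definition above) =====
theorem compute_group_bounds_py_spec : Claim_equal_compute_group_bounds_py := by
  intro n g _ hpre
  obtain ⟨hg0, hle⟩ := hpre
  unfold Spec_compute_group_bounds_py compute_group_bounds_py compute_group_bounds_py_alt
  simp only []
  rcases lt_or_gt_of_ne hg0 with hneg | hpos
  · -- n_groups < 0: both ranges are empty
    have : PySem.List.pyRange 0 g 1 = [] := by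
      simp [PySem.List.pyRange_one]; omega
    simp [this]
  · -- n_groups > 0: apply the loop invariant from index 0
    have hrem : n - PySem.Int.floordiv n g * g = PySem.Int.mod n g := by
      have := PySem.Int.floordiv_mul_add_mod n g
      omega
    have hnn : 0 ≤ PySem.Int.mod n g := PySem.Int.mod_nonneg n hpos
    have key := pv_loop_eq (PySem.Int.floordiv n g) (PySem.Int.mod n g) (g - 0).toNat 0 g rfl []
    rw [show (0 : Int) * PySem.Int.floordiv n g + min 0 (PySem.Int.mod n g) = 0 from by
      rw [min_eq_left hnn]; ring] at key
    rw [hrem]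
    simpa using key
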